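-- pv_equiv track=rewrite | github.com/raminrafi/Search-Engine-in-Python | a.py | docscount
-- ===== SOURCE A (Python) =====
-- def docscount(my_list): #totaldocs counter for terms
--     counter = 1
--     mytempid = my_list[0]
--     mycountlist = []
--     for i in range(len(my_list)):
--         if my_list[i][0] == mytempid[0]:
--             if my_list[i][1] != mytempid[1]:
--                 counter += 1
--                 mytempid = my_list[i]
--         else:
--             mycountlist.append(counter)
--             mytempid = my_list[i]
--             counter = 1
--     mycountlist.append(counter)
--     return mycountlist
-- ===== SOURCE B (Python) =====
-- def docscount(my_list):
--     # group-then-count: split into consecutive runs of equal term,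
--     # then per run count 1 + number of adjacent doc-id changes
--     groups = []
--     cur = []
--     for item in my_list:
--         if cur and cur[0][0] == item[0]:
--             cur.append(item)
--         else:
--             if cur:
--                 groups.append(cur)
--             cur = [item]
--     if cur:
--         groups.append(cur)
--     return [1 + sum(1 for p, q in zip(g, g[1:]) if p[1] != q[1]) for g in groups]
-- ===== Notes on version B (the rewrite author's own statement) =====
-- stated objective: idiomatic
-- what changed: Replaced A's fused single pass with mutable counter/tempid state by a two-level decomposition: first split the list into consecutive equal-term runs, then map each run to 1 + the number of adjacent doc-id changes.
import Mathlib
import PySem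

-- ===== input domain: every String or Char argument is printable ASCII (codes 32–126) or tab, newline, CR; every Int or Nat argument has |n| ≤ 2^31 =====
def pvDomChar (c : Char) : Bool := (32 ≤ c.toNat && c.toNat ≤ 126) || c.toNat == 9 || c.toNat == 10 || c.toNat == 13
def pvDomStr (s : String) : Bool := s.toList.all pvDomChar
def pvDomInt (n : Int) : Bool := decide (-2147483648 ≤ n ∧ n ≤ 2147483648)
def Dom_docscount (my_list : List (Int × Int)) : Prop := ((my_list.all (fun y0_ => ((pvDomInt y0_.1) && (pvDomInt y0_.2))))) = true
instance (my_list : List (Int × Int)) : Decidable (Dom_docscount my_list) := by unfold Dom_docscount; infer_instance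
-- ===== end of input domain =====

-- B replaces A's fused counter/tempid pass by an idiomatic group-then-count decomposition (same O(n) cost).


-- ===== PORT A =====
-- A's for-loop over range(len(my_list)) as a structural recursion over the remaining
-- items with the same state (counter, mytempid, mycountlist).
def docscountLoop : List (Int × Int) → Int → (Int × Int) → List Int → List Int
  | [], counter, _, acc => acc ++ [counter]
  | x :: rest, counter, tempid, acc =>
    if x.1 = tempid.1 then
      if x.2 ≠ tempid.2 then docscountLoop rest (counter + 1) x acc
      else docscountLoop rest counter tempid acc
    else docscountLoop rest 1 x (acc ++ [counter])

def docscount (my_list : List (Int × Int)) : List Int :=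
  match my_list with
  | [] => []          -- Python raises IndexError at my_list[0]; excluded by Pre_docscount
  | h :: _ => docscountLoop my_list 1 h []

-- ===== PORT B =====
-- Source B's grouping loop: state (groups, cur), appending to cur / pushing cur.
def docscountRuns : List (Int × Int) → List (List (Int × Int)) → List (Int × Int) → List (List (Int × Int))
  | [], groups, cur => if cur.isEmpty then groups else groups ++ [cur]
  | x :: rest, groups, cur =>
    match cur with
    | [] => docscountRuns rest groups [x]
    | c :: _ =>
      if c.1 = x.1 then docscountRuns rest groups (cur ++ [x])
      else docscountRuns rest (groups ++ [cur]) [x]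

-- 1 + sum(1 for p, q in zip(g, g[1:]) if p[1] != q[1])
def docscountOfRun (g : List (Int × Int)) : Int :=
  1 + ((g.zip g.tail).filter (fun pq => pq.1.2 ≠ pq.2.2)).length

def docscount_alt (my_list : List (Int × Int)) : List Int :=
  (docscountRuns my_list [] []).map docscountOfRun

-- ===== PRECONDITION & SPEC =====
-- A reads my_list[0] before the loop, so it raises IndexError on the empty list.
def Pre_docscount (my_list : List (Int × Int)) : Prop := my_list ≠ []
instance (my_list : List (Int × Int)) : Decidable (Pre_docscount my_list) := by unfold Pre_docscount; infer_instance
def pvWitness_docscount : (List (Int × Int)) := [(1, 2), (1, 3), (2, 2)]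

def Spec_docscount (my_list : List (Int × Int)) (out : List Int) : Prop := out = docscount_alt my_list
instance (my_list : List (Int × Int)) (out : List Int) : Decidable (Spec_docscount my_list out) := by unfold Spec_docscount; infer_instance

-- ===== CLAIM (what is proved, stated in full; the proofs are below) =====
def Claim_equal_docscount : Prop := ∀ (my_list : List (Int × Int)), Dom_docscount my_list → Pre_docscount my_list → Spec_docscount my_list (docscount my_list)

-- ===== LEMMAS AND PROOFS =====

-- zip of a one-longer list with its tail gains exactly the pair (last, x)
theorem zip_tail_append (cur : List (Int × Int)) (x : Int × Int) (h : cur ≠ []) :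
    (cur ++ [x]).zip (cur ++ [x]).tail = cur.zip cur.tail ++ [(cur.getLast h, x)] := by
  induction cur with
  | nil => exact absurd rfl h
  | cons c cs ih =>
    cases cs with
    | nil => simp [List.getLast]
    | cons d ds =>
      have := ih (by simp)
      simp only [List.cons_append, List.zip_cons_cons, List.tail_cons] at *
      rw [this]
      simp [List.getLast]

theorem countRun_append (cur : List (Int × Int)) (x : Int × Int) (h : cur ≠ []) :
    docscountOfRun (cur ++ [x]) =
      docscountOfRun cur + (if x.2 ≠ (cur.getLast h).2 then 1 else 0) := by
  unfold docscountOfRun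
  rw [zip_tail_append cur x h, List.filter_append]
  by_cases hd : x.2 = (cur.getLast h).2
  · rw [if_neg (not_not_intro hd)]
    rw [List.filter_cons, if_neg (by simp [hd])]
    simp
  · rw [if_pos hd]
    rw [List.filter_cons, if_pos (by simp only [decide_eq_true_eq]; exact fun e => hd e.symm)]
    simp only [List.filter_nil, List.length_append, List.length_cons, List.length_nil]
    push_cast
    ring

-- main bridge: A's loop vs B's grouping, related by the stated invariant
theorem loop_eq_runs (rest : List (Int × Int)) :
    ∀ (counter : Int) (tempid : Int × Int) (acc : List Int)
      (groups : List (List (Int × Int))) (cur : List (Int × Int)) (hcur : cur ≠ []),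
      (cur.head hcur).1 = tempid.1 →
      (cur.getLast hcur).2 = tempid.2 →
      counter = docscountOfRun cur →
      acc = groups.map docscountOfRun →
      docscountLoop rest counter tempid acc = (docscountRuns rest groups cur).map docscountOfRun := by
  induction rest with
  | nil =>
    intro counter tempid acc groups cur hcur _ _ hc ha
    cases cur with
    | nil => exact absurd rfl hcur
    | cons c cs => simp [docscountLoop, docscountRuns, hc, ha]
  | cons x rest ih =>
    intro counter tempid acc groups cur hcur h1 h2 hc ha
    cases cur with
    | nil => exact absurd rfl hcur
    | cons c cs =>
      simp only [List.head_cons] at h1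
      simp only [docscountLoop, docscountRuns]
      by_cases ht : x.1 = tempid.1
      · have ht' : c.1 = x.1 := h1.trans ht.symm
        rw [if_pos ht, if_pos ht']
        by_cases hd : x.2 = tempid.2
        · rw [if_neg (not_not_intro hd)]
          refine ih counter tempid acc groups ((c :: cs) ++ [x]) (by simp) (by simpa using h1)
            (by simp [hd]) ?_ ha
          rw [countRun_append (c :: cs) x hcur, ← hc,
            if_neg (not_not_intro (by rw [h2]; exact hd))]
          ring
        · rw [if_pos hd]
          refine ih (counter + 1) x acc groups ((c :: cs) ++ [x]) (by simp) (by simpa using ht')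
            (by simp) ?_ ha
          rw [countRun_append (c :: cs) x hcur, ← hc, if_pos (by rw [h2]; exact hd)]
      · have ht' : ¬ c.1 = x.1 := fun e => ht (e.symm.trans h1)
        rw [if_neg ht, if_neg ht']
        exact ih 1 x (acc ++ [counter]) (groups ++ [c :: cs]) [x] (by simp) rfl rfl
          (by simp [docscountOfRun]) (by simp [ha, hc])

-- ===== VERDICT (by name: the statement is the Claim_ definition above) =====
theorem docscount_spec : Claim_equal_docscount := by
  intro my_list _ hpre
  unfold Spec_docscount
  cases my_list with
  | nil => exact absurd rfl hpre
  | cons h t =>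
    have e1 : docscountLoop (h :: t) 1 h [] = docscountLoop t 1 h [] := by
      simp [docscountLoop]
    have e2 : docscountRuns (h :: t) [] [] = docscountRuns t [] [h] := by
      simp [docscountRuns]
    show docscountLoop (h :: t) 1 h [] = (docscountRuns (h :: t) [] []).map docscountOfRun
    rw [e1, e2]
    exact loop_eq_runs t 1 h [] [] [h] (by simp) rfl rfl (by simp [docscountOfRun]) rfl
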